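-- pv_equiv track=rewrite | github.com/icetomoyo/EvoSkill | koda/ai/providers/openai_provider.py | _get_context_window
-- ===== SOURCE A (Python) =====
-- def _get_context_window(model_id: str) -> int:
--     """Get context window for model"""
--     windows = {
--         "gpt-4o": 128000,
--         "gpt-4o-mini": 128000,
--         "gpt-4-turbo": 128000,
--         "gpt-4": 8192,
--         "gpt-3.5-turbo": 16385,
--     }
--     for prefix, window in windows.items():
--         if model_id.startswith(prefix):
--             return window
--     return 8192  # Default
-- ===== SOURCE B (Python) =====
-- def _get_context_window(model_id: str) -> int:
--     """Get context window for model"""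
--     windows = {
--         "gpt-4o": 128000,
--         "gpt-4o-mini": 128000,
--         "gpt-4-turbo": 128000,
--         "gpt-4": 8192,
--         "gpt-3.5-turbo": 16385,
--     }
--     matches = [(prefix, window) for prefix, window in windows.items()
--                if model_id.startswith(prefix)]
--     if not matches:
--         return 8192  # Default
--     return max(matches, key=lambda pw: len(pw[0]))[1]
-- ===== Notes on version B (the rewrite author's own statement) =====
-- stated objective: idiomatic
-- what changed: B replaces A's order-dependent first-hit scan over the dict with an explicit longest-matching-prefix selection (filter the prefixes that match, then take the max by prefix length), so correctness no longer depends on the dict's insertion order.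
import Mathlib
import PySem

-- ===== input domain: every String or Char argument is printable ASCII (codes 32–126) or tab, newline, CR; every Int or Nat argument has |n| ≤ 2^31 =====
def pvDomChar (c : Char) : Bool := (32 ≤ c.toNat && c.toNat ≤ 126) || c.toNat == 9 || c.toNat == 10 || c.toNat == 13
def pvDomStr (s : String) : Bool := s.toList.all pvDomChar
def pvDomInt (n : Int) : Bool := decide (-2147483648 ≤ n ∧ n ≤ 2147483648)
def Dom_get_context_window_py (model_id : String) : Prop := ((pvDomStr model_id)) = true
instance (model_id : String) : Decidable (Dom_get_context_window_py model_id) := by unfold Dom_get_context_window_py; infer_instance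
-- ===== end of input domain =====

-- B replaces A's order-dependent first-hit scan with an explicit longest-matching-prefix selection (idiomatic; same cost).

-- ===== PORT A =====
-- the dict literal of A, in insertion order
def pvWindowsA : List (String × Int) :=
  [("gpt-4o", 128000), ("gpt-4o-mini", 128000), ("gpt-4-turbo", 128000),
   ("gpt-4", 8192), ("gpt-3.5-turbo", 16385)]

-- the 'for prefix, window in windows.items(): if model_id.startswith(prefix): return window' loop
def pvScanA : List (String × Int) → String → Int
  | [], _ => 8192
  | (p, w) :: t, m => if PySem.Str.startswith m p then w else pvScanA t m

def get_context_window_py (model_id : String) : Int :=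
  pvScanA pvWindowsA model_id

-- ===== PORT B =====
def pvWindowsB : List (String × Int) :=
  [("gpt-4o", 128000), ("gpt-4o-mini", 128000), ("gpt-4-turbo", 128000),
   ("gpt-4", 8192), ("gpt-3.5-turbo", 16385)]

def get_context_window_py_alt (model_id : String) : Int :=
  let ms := pvWindowsB.filter (fun pw => PySem.Str.startswith model_id pw.1)
  -- Python's max(matches, key=…) is PySem.List.max? (first extremal); [] → the 8192 default
  match PySem.List.max? ms (fun pw => PySem.Str.len pw.1) with
  | none => 8192
  | some pw => pw.2

-- ===== PRECONDITION & SPEC =====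
def Spec_get_context_window_py (model_id : String) (out : Int) : Prop := out = get_context_window_py_alt model_id
instance (model_id : String) (out : Int) : Decidable (Spec_get_context_window_py model_id out) := by unfold Spec_get_context_window_py; infer_instance

-- ===== CLAIM (what is proved, stated in full; the proofs are below) =====
def Claim_equal_get_context_window_py : Prop := ∀ (model_id : String), Dom_get_context_window_py model_id → Spec_get_context_window_py model_id (get_context_window_py model_id)

-- ===== LEMMAS AND PROOFS =====

-- startswith is monotone in string-prefixes of the tested prefix
theorem pv_sw_mono (m p q : String) (h : p.toList <+: q.toList)
    (hq : PySem.Str.startswith m q = true) : PySem.Str.startswith m p = true := by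
  simp only [PySem.Str.startswith_eq, PySem.Chars.startswith_iff] at hq ⊢
  exact h.trans hq

-- two prefixes of the same string are comparable; used to refute impossible flag combinations
theorem pv_sw_compat (m p q : String)
    (hp : PySem.Str.startswith m p = true) (hq : PySem.Str.startswith m q = true) :
    p.toList <+: q.toList ∨ q.toList <+: p.toList := by
  simp only [PySem.Str.startswith_eq, PySem.Chars.startswith_iff] at hp hq
  exact List.prefix_or_prefix_of_prefix hp hq

-- ===== VERDICT (by name: the statement is the Claim_ definition above) =====
theorem get_context_window_py_spec : Claim_equal_get_context_window_py := by
  intro m _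
  unfold Spec_get_context_window_py
  by_cases h1 : PySem.Str.startswith m "gpt-4o" = true <;>
  by_cases h2 : PySem.Str.startswith m "gpt-4o-mini" = true <;>
  by_cases h3 : PySem.Str.startswith m "gpt-4-turbo" = true <;>
  by_cases h4 : PySem.Str.startswith m "gpt-4" = true <;>
  by_cases h5 : PySem.Str.startswith m "gpt-3.5-turbo" = true <;>
  first
  | exact absurd (pv_sw_mono m "gpt-4o" "gpt-4o-mini" (by decide) h2) h1
  | exact absurd (pv_sw_mono m "gpt-4" "gpt-4o" (by decide) h1) h4
  | exact absurd (pv_sw_mono m "gpt-4" "gpt-4-turbo" (by decide) h3) h4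
  | exact absurd (pv_sw_compat m "gpt-4o" "gpt-4-turbo" h1 h3) (by decide)
  | exact absurd (pv_sw_compat m "gpt-4" "gpt-3.5-turbo" h4 h5) (by decide)
  | (simp at h1 h2 h3 h4 h5 <;>
     simp [get_context_window_py, get_context_window_py_alt, pvWindowsA, pvWindowsB, pvScanA,
           PySem.List.max?, PySem.Str.len, h1, h2, h3, h4, h5] <;>
     decide)
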